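-- pv_equiv track=rewrite | github.com/Ocean-code-1995/recruitment-agent | src/backend/doc_parser/utils/sections.py | merge_duplicate_titles
-- ===== SOURCE A (Python) =====
-- from collections import OrderedDict
-- from typing import Dict, List
--
-- def merge_duplicate_titles(sections: List[Dict[str, str]]) -> List[Dict[str, str]]:
--     """Merge sections with duplicate titles while preserving order."""
--     merged: "OrderedDict[str, str]" = OrderedDict()
--
--     for s in sections:
--         title = s.get("title", "").strip()
--         body = (s.get("body", "") or "").strip()
--
--         if title in merged:
--             if body:
--                 prev = merged[title]
--                 merged[title] = (prev + ("\n\n" if prev else "") + body).strip()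
--         else:
--             merged[title] = body
--
--     return [{"title": t, "body": b} for t, b in merged.items()]
-- ===== SOURCE B (Python) =====
-- def merge_duplicate_titles(sections):
--     """Merge sections with duplicate titles while preserving order."""
--     titles = []
--     for s in sections:
--         t = s.get("title", "").strip()
--         if t not in titles:
--             titles.append(t)
--     return [
--         {
--             "title": t,
--             "body": "\n\n".join(
--                 b
--                 for b in ((s.get("body", "") or "").strip()
--                           for s in sections
--                           if s.get("title", "").strip() == t)
--                 if b
--             ),
--         }
--         for t in titles
--     ]
-- ===== Notes on version B (the rewrite author's own statement) =====
-- stated objective: alternative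
-- what changed: B uses no dict at all: a first pass deduplicates the stripped titles in first-appearance order, then for each distinct title a second scan over all sections collects its non-empty stripped bodies and joins them once with '\n\n', instead of A's single-pass ordered-dict grouping with per-occurrence string concatenation and re-strip.
import Mathlib
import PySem

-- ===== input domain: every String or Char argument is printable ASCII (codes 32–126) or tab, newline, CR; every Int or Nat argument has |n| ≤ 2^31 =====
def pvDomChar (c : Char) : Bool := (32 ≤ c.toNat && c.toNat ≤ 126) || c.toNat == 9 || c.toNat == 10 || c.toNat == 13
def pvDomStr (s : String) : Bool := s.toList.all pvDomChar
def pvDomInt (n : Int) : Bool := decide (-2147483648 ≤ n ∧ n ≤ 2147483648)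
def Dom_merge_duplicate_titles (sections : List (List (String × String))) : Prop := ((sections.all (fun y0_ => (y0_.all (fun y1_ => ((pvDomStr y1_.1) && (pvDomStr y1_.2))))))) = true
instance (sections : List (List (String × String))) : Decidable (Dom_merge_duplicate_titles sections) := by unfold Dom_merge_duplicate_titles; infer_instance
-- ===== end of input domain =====

-- B uses no dict: it deduplicates the stripped titles in first-appearance order, then rescans all
-- sections per distinct title, collecting its non-empty stripped bodies and joining them once
-- (objective: alternative — nested passes instead of A's single-pass ordered-dict grouping).

-- ===== PORT A =====
-- s.get(k, "") on the dict s (association list, first match wins), as a char list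
def pvGet (s : List (String × String)) (k : String) : List Char :=
  match s.lookup k with
  | some v => v.toList
  | none => []

-- the body of A's for-loop
def mdtStepA (d : PySem.Dict (List Char) (List Char)) (s : List (String × String)) :
    PySem.Dict (List Char) (List Char) :=
  let title := PySem.Chars.strip (pvGet s "title")
  let body  := PySem.Chars.strip (pvGet s "body")
  if d.contains title then
    if body ≠ [] then
      let prev := d.getD title []
      d.insert title (PySem.Chars.strip (prev ++ (if prev ≠ [] then ['\n', '\n'] else []) ++ body))
    else d
  else d.insert title body

def merge_duplicate_titles (sections : List (List (String × String))) : List (List (String × String)) :=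
  let merged := sections.foldl mdtStepA PySem.Dict.empty
  merged.items.map (fun p => [("title", String.ofList p.1), ("body", String.ofList p.2)])

-- ===== PORT B =====
-- B's first pass: the distinct stripped titles in first-appearance order
def mdtTitles (sections : List (List (String × String))) : List (List Char) :=
  sections.foldl (fun ts s =>
    let t := PySem.Chars.strip (pvGet s "title")
    if t ∈ ts then ts else ts ++ [t]) []

-- B's per-title rescan: the non-empty stripped bodies of the sections whose stripped title is t
def mdtBodies (sections : List (List (String × String))) (t : List Char) : List (List Char) :=
  sections.filterMap (fun s =>
    if PySem.Chars.strip (pvGet s "title") = t then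
      let b := PySem.Chars.strip (pvGet s "body")
      if b = [] then none else some b
    else none)

def merge_duplicate_titles_alt (sections : List (List (String × String))) : List (List (String × String)) :=
  (mdtTitles sections).map (fun t =>
    [("title", String.ofList t),
     ("body", String.ofList (PySem.Chars.join ['\n', '\n'] (mdtBodies sections t)))])

-- ===== PRECONDITION & SPEC =====
def Spec_merge_duplicate_titles (sections : List (List (String × String))) (out : List (List (String × String))) : Prop := out = merge_duplicate_titles_alt sections
instance (sections : List (List (String × String))) (out : List (List (String × String))) : Decidable (Spec_merge_duplicate_titles sections out) := by unfold Spec_merge_duplicate_titles; infer_instance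

-- ===== CLAIM (what is proved, stated in full; the proofs are below) =====
def Claim_equal_merge_duplicate_titles : Prop := ∀ (sections : List (List (String × String))), Dom_merge_duplicate_titles sections → Spec_merge_duplicate_titles sections (merge_duplicate_titles sections)

-- ===== LEMMAS AND PROOFS =====

-- proof-side bridge: the dict-of-lists a single grouping pass would build
def mdtStepG (d : PySem.Dict (List Char) (List (List Char))) (s : List (String × String)) :
    PySem.Dict (List Char) (List (List Char)) :=
  let title := PySem.Chars.strip (pvGet s "title")
  let body  := PySem.Chars.strip (pvGet s "body")
  let d' := d.setdefault title []
  if body ≠ [] then d'.modify title [] (· ++ [body]) else d'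

-- a string is "clean" when stripping it is a no-op
def mdtClean (s : List Char) : Prop := PySem.Chars.strip s = s

lemma mdtClean_lstrip {a : List Char} (h : mdtClean a) : PySem.Chars.lstrip a = a := by
  have h1 : (PySem.Chars.strip a).Sublist (PySem.Chars.lstrip a) := by
    simpa [PySem.Chars.strip, PySem.Chars.rstrip] using
      (List.dropWhile_sublist (l := (PySem.Chars.lstrip a).reverse) PySem.Chars.isspace).reverse
  have h2 : (PySem.Chars.lstrip a).Sublist a := List.dropWhile_sublist _
  have hlen : (PySem.Chars.lstrip a).length = a.length := by
    have := h1.length_le; have := h2.length_le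
    have : a.length ≤ (PySem.Chars.strip a).length := by rw [h]
    omega
  exact h2.eq_of_length hlen

lemma mdtClean_rstrip {a : List Char} (h : mdtClean a) : PySem.Chars.rstrip a = a := by
  have := mdtClean_lstrip h
  calc PySem.Chars.rstrip a = PySem.Chars.strip a := by rw [PySem.Chars.strip] at *; rw [this]
  _ = a := h

lemma mdt_lstrip_append {a : List Char} (t : List Char) (h : PySem.Chars.lstrip a = a) (ha : a ≠ []) :
    PySem.Chars.lstrip (a ++ t) = a ++ t := by
  obtain ⟨x, xs, rfl⟩ := List.exists_cons_of_ne_nil ha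
  have hx : PySem.Chars.isspace x = false := by
    by_contra hc
    simp only [Bool.not_eq_false] at hc
    simp [PySem.Chars.lstrip, hc] at h
    have := (List.dropWhile_sublist (l := xs) PySem.Chars.isspace).length_le
    have := congrArg List.length h
    simp at this; omega
  simp [PySem.Chars.lstrip, hx]

lemma mdt_rstrip_append {b : List Char} (t : List Char) (h : PySem.Chars.rstrip b = b) (hb : b ≠ []) :
    PySem.Chars.rstrip (t ++ b) = t ++ b := by
  have h' : PySem.Chars.lstrip b.reverse = b.reverse := by
    have := congrArg List.reverse h
    simpa [PySem.Chars.rstrip, PySem.Chars.lstrip] using this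
  have hb' : b.reverse ≠ [] := by simpa using hb
  have := mdt_lstrip_append (t := t.reverse) h' hb'
  have := congrArg List.reverse this
  simpa [PySem.Chars.rstrip, PySem.Chars.lstrip] using this

lemma mdt_strip_append {a b : List Char} (m : List Char) (ha : a ≠ []) (hca : mdtClean a)
    (hb : b ≠ []) (hcb : mdtClean b) : PySem.Chars.strip (a ++ m ++ b) = a ++ m ++ b := by
  rw [PySem.Chars.strip, List.append_assoc,
    mdt_lstrip_append (m ++ b) (mdtClean_lstrip hca) ha, ← List.append_assoc,
    mdt_rstrip_append (a ++ m) (mdtClean_rstrip hcb) hb]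

lemma mdt_dropWhile_idem (p : Char → Bool) (l : List Char) :
    List.dropWhile p (List.dropWhile p l) = List.dropWhile p l := by
  rcases eq_or_ne (List.dropWhile p l) [] with h | h
  · rw [h]; rfl
  · rw [List.dropWhile_eq_self_iff]
    intro hl
    have := List.head_dropWhile_not p h
    simpa [List.getElem_zero_eq_head] using this

lemma mdt_rstrip_idem (t : List Char) : PySem.Chars.rstrip (PySem.Chars.rstrip t) = PySem.Chars.rstrip t := by
  simp [PySem.Chars.rstrip, mdt_dropWhile_idem]

lemma mdt_lstrip_rstrip (t : List Char) (h : PySem.Chars.lstrip t = t) :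
    PySem.Chars.lstrip (PySem.Chars.rstrip t) = PySem.Chars.rstrip t := by
  rcases eq_or_ne (PySem.Chars.rstrip t) [] with h0 | h0
  · rw [h0]; rfl
  · have hpre : (PySem.Chars.rstrip t) <+: t := by
      simpa [PySem.Chars.rstrip] using (List.dropWhile_suffix (l := t.reverse) PySem.Chars.isspace).reverse
    rw [PySem.Chars.lstrip, List.dropWhile_eq_self_iff]
    intro hl
    have ht : t ≠ [] := by rintro rfl; simp [PySem.Chars.rstrip] at h0
    have hlt : 0 < t.length := List.length_pos_of_ne_nil ht
    have hhead : (PySem.Chars.rstrip t)[0] = t[0] := hpre.getElem hl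
    have : PySem.Chars.isspace (t.head ht) = false := by
      have h2 : List.dropWhile PySem.Chars.isspace t = t := h
      have := List.head_dropWhile_not PySem.Chars.isspace (l := t) (by rw [h2]; exact ht)
      simpa [h2] using this
    rw [hhead]
    simpa [List.getElem_zero_eq_head] using this

lemma mdt_strip_idem (s : List Char) : mdtClean (PySem.Chars.strip s) := by
  unfold mdtClean
  have h1 : PySem.Chars.lstrip (PySem.Chars.lstrip s) = PySem.Chars.lstrip s := by
    simp [PySem.Chars.lstrip, mdt_dropWhile_idem]
  rw [PySem.Chars.strip, PySem.Chars.strip, mdt_lstrip_rstrip _ h1, mdt_rstrip_idem]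

lemma mdt_join_append_singleton (sep b : List Char) (p : List Char) (parts : List (List Char)) :
    PySem.Chars.join sep (p :: parts ++ [b]) = PySem.Chars.join sep (p :: parts) ++ sep ++ b := by
  induction parts generalizing p with
  | nil => simp [PySem.Chars.join_cons_cons, PySem.Chars.join_singleton]
  | cons q rest ih =>
    simp only [List.cons_append] at ih ⊢
    rw [PySem.Chars.join_cons_cons, ih q, PySem.Chars.join_cons_cons]
    simp [List.append_assoc]

lemma mdt_join_clean {parts : List (List Char)} (hne : parts ≠ [])
    (h : ∀ x ∈ parts, x ≠ [] ∧ mdtClean x) :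
    PySem.Chars.join ['\n', '\n'] parts ≠ [] ∧ mdtClean (PySem.Chars.join ['\n', '\n'] parts) := by
  induction parts with
  | nil => exact absurd rfl hne
  | cons p rest ih =>
    rcases rest with _ | ⟨q, rest'⟩
    · simpa [PySem.Chars.join_singleton] using h p (by simp)
    · have hp := h p (by simp)
      have hrest := ih (by simp) (fun x hx => h x (by simp [hx]))
      rw [PySem.Chars.join_cons_cons]
      refine ⟨by simp [hp.1], ?_⟩
      exact mdt_strip_append _ hp.1 hp.2 hrest.1 hrest.2

-- the loop invariant tying A's dict to the grouping dict-of-lists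
def mdtInv (dA : PySem.Dict (List Char) (List Char)) (dB : PySem.Dict (List Char) (List (List Char))) : Prop :=
  dB.keys.Nodup ∧
  (∀ p ∈ dB.items, ∀ x ∈ p.2, x ≠ [] ∧ mdtClean x) ∧
  dA.items = dB.items.map (fun p => (p.1, PySem.Chars.join ['\n', '\n'] p.2))

lemma mdt_step (dA : PySem.Dict (List Char) (List Char)) (dB : PySem.Dict (List Char) (List (List Char)))
    (h : mdtInv dA dB) (s : List (String × String)) : mdtInv (mdtStepA dA s) (mdtStepG dB s) := by
  obtain ⟨hnd, hcl, hit⟩ := h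
  set t := PySem.Chars.strip (pvGet s "title") with ht
  set b := PySem.Chars.strip (pvGet s "body") with hb
  have hbclean : mdtClean b := mdt_strip_idem _
  have hkeys : dA.keys = dB.keys := by
    show dA.items.map Prod.fst = dB.items.map Prod.fst
    rw [hit, List.map_map]; rfl
  have hAnd : dA.keys.Nodup := by rw [hkeys]; exact hnd
  have hcont : dA.contains t = dB.contains t := by
    rw [PySem.Dict.contains_eq_decide_mem_keys, PySem.Dict.contains_eq_decide_mem_keys, hkeys]
  unfold mdtStepA mdtStepG
  simp only [← ht, ← hb]
  by_cases hc : dB.contains t = true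
  · -- title already present
    rw [hcont, if_pos hc, PySem.Dict.setdefault_of_contains _ _ hc]
    -- find the entry of t in dB
    have hmem : t ∈ dB.keys := (PySem.Dict.contains_iff_mem_keys dB t).mp hc
    obtain ⟨parts, hpmem⟩ : ∃ parts, (t, parts) ∈ dB.items := by
      obtain ⟨p, hp, hp1⟩ := List.mem_map.mp hmem
      exact ⟨p.2, by rw [← hp1]; exact hp⟩
    have hgetB : dB.getD t [] = parts := PySem.Dict.getD_of_mem_items dB hpmem hnd []
    have hAmem : (t, PySem.Chars.join ['\n', '\n'] parts) ∈ dA.items := by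
      rw [hit]; exact List.mem_map.mpr ⟨(t, parts), hpmem, rfl⟩
    have hgetA : dA.getD t [] = PySem.Chars.join ['\n', '\n'] parts :=
      PySem.Dict.getD_of_mem_items dA hAmem hAnd []
    have hpartsclean := hcl (t, parts) hpmem
    by_cases hbe : b = []
    · simp only [hbe, ne_eq, not_true_eq_false, ite_false]
      exact ⟨hnd, hcl, hit⟩
    · simp only [ne_eq, hbe, not_false_eq_true, if_pos]
      have hAcont : dA.contains t = true := by rw [hcont]; exact hc
      have hnewval : PySem.Chars.strip (dA.getD t [] ++ ((if dA.getD t [] = [] then [] else ['\n','\n']) ++ b))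
          = PySem.Chars.join ['\n', '\n'] (parts ++ [b]) := by
        rw [hgetA]
        rcases parts with _ | ⟨p0, rest⟩
        · simp only [PySem.Chars.join_nil, List.nil_append, PySem.Chars.join_singleton]
          exact hbclean
        · have hjc := mdt_join_clean (parts := p0 :: rest) (by simp) hpartsclean
          rw [if_neg hjc.1, mdt_join_append_singleton, ← List.append_assoc]
          exact mdt_strip_append _ hjc.1 hjc.2 hbe hbclean
      rw [PySem.Dict.modify]
      refine ⟨PySem.Dict.nodup_keys_insert _ _ _ hnd, ?_, ?_⟩
      · intro p hp x hx
        rcases (PySem.Dict.mem_items_insert _ _ _ _).mp hp with hp1 | ⟨hp2, _⟩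
        · subst hp1
          rw [hgetB] at hx
          simp only at hx
          rcases List.mem_append.mp hx with hx1 | hx2
          · exact hpartsclean x hx1
          · simp at hx2; subst hx2; exact ⟨hbe, hbclean⟩
        · exact hcl p hp2 x hx
      · rw [PySem.Dict.items_insert_of_contains _ _ hAcont,
          PySem.Dict.items_insert_of_contains _ _ hc, hit, List.map_map, List.map_map]
        apply List.map_congr_left
        intro p hp
        by_cases hpt : p.1 = t
        · have : p = (t, parts) := by
            have h1 : (p.1, p.2) ∈ dB.items := hp
            rw [hpt] at h1
            have := PySem.Dict.getD_of_mem_items dB h1 hnd []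
            rw [hgetB] at this
            exact Prod.ext hpt (by simp [← this])
          subst this
          simp only [Function.comp, beq_self_eq_true, if_pos, hgetB]
          simp [hnewval]
        · simp [Function.comp, hpt]
  · -- new title
    have hc' : dB.contains t = false := by simpa using hc
    have hAc : dA.contains t = false := by rw [hcont]; exact hc'
    rw [hcont, if_neg (by simp [hc']), PySem.Dict.setdefault_of_not_contains _ _ hc']
    by_cases hbe : b = []
    · simp only [hbe, ne_eq, not_true_eq_false, ite_false]
      refine ⟨PySem.Dict.nodup_keys_insert _ _ _ hnd, ?_, ?_⟩
      · intro p hp x hx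
        rcases (PySem.Dict.mem_items_insert _ _ _ _).mp hp with hp1 | ⟨hp2, _⟩
        · subst hp1; simp at hx
        · exact hcl p hp2 x hx
      · rw [PySem.Dict.items_insert_of_not_contains _ _ hAc,
          PySem.Dict.items_insert_of_not_contains _ _ hc', hit]
        simp [PySem.Chars.join_nil]
    · simp only [ne_eq, hbe, not_false_eq_true, if_pos]
      rw [PySem.Dict.modify, PySem.Dict.getD_insert_self, PySem.Dict.insert_insert_self]
      refine ⟨PySem.Dict.nodup_keys_insert _ _ _ hnd, ?_, ?_⟩
      · intro p hp x hx
        rcases (PySem.Dict.mem_items_insert _ _ _ _).mp hp with hp1 | ⟨hp2, _⟩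
        · subst hp1; simp at hx; subst hx; exact ⟨hbe, hbclean⟩
        · exact hcl p hp2 x hx
      · rw [PySem.Dict.items_insert_of_not_contains _ _ hAc,
          PySem.Dict.items_insert_of_not_contains _ _ hc', hit]
        simp [PySem.Chars.join_singleton]

lemma mdt_fold (sections : List (List (String × String)))
    (dA : PySem.Dict (List Char) (List Char)) (dB : PySem.Dict (List Char) (List (List Char)))
    (h : mdtInv dA dB) : mdtInv (sections.foldl mdtStepA dA) (sections.foldl mdtStepG dB) := by
  induction sections generalizing dA dB with
  | nil => exact h
  | cons s rest ih => exact ih _ _ (mdt_step _ _ h s)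

-- ===== linking the grouping dict to B's titles/bodies passes =====

def mdtTitlesStep (ts : List (List Char)) (s : List (String × String)) : List (List Char) :=
  if PySem.Chars.strip (pvGet s "title") ∈ ts then ts else ts ++ [PySem.Chars.strip (pvGet s "title")]

lemma mdtTitles_eq_foldl (sections : List (List (String × String))) :
    mdtTitles sections = sections.foldl mdtTitlesStep [] := rfl

lemma mdtTitles_nodup_aux (l : List (List (String × String))) (ts : List (List Char)) (h : ts.Nodup) :
    (l.foldl mdtTitlesStep ts).Nodup := by
  induction l generalizing ts with
  | nil => exact h
  | cons s rest ih =>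
    apply ih
    unfold mdtTitlesStep
    split_ifs with hm
    · exact h
    · apply List.Nodup.append h (List.nodup_singleton _)
      intro a ha hb
      simp at hb
      exact hm (hb ▸ ha)

lemma mdtTitles_mono (l : List (List (String × String))) (ts : List (List Char)) :
    ts ⊆ l.foldl mdtTitlesStep ts := by
  induction l generalizing ts with
  | nil => exact fun _ h => h
  | cons s rest ih =>
    intro x hx
    apply ih
    unfold mdtTitlesStep
    split_ifs <;> simp [hx]

lemma mdtTitles_mem (l : List (List (String × String))) (ts : List (List Char))
    (s : List (String × String)) (hs : s ∈ l) :
    PySem.Chars.strip (pvGet s "title") ∈ l.foldl mdtTitlesStep ts := by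
  induction l generalizing ts with
  | nil => cases hs
  | cons s0 rest ih =>
    rcases List.mem_cons.mp hs with rfl | hs
    · rw [List.foldl_cons]
      apply mdtTitles_mono
      unfold mdtTitlesStep
      split_ifs with hm
      · exact hm
      · simp
    · exact ih _ hs

lemma mdtBodies_append (pre : List (List (String × String))) (s : List (String × String)) (t : List Char) :
    mdtBodies (pre ++ [s]) t = mdtBodies pre t ++
      (if PySem.Chars.strip (pvGet s "title") = t then
        (if PySem.Chars.strip (pvGet s "body") = [] then [] else [PySem.Chars.strip (pvGet s "body")])
       else []) := by
  unfold mdtBodies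
  rw [List.filterMap_append]
  congr 1
  simp only [List.filterMap]
  split_ifs <;> rfl

lemma mdtBodies_nil_of_not_mem (pre : List (List (String × String))) (t : List Char)
    (h : t ∉ mdtTitles pre) : mdtBodies pre t = [] := by
  unfold mdtBodies
  rw [List.filterMap_eq_nil_iff]
  intro s hs
  rw [mdtTitles_eq_foldl] at h
  split_ifs with h1
  · exact absurd (h1 ▸ mdtTitles_mem pre [] s hs) h
  · rfl

-- the grouping fold computes exactly B's (titles, bodies) table
lemma mdt_group_spec (sections : List (List (String × String))) :
    (sections.foldl mdtStepG PySem.Dict.empty).items =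
      (mdtTitles sections).map (fun t => (t, mdtBodies sections t)) := by
  induction sections using List.reverseRecOn with
  | nil => simp [mdtTitles, mdtBodies, PySem.Dict.empty]
  | append_singleton pre s ih =>
    have hnd : (mdtTitles pre).Nodup := mdtTitles_nodup_aux pre [] (by simp)
    have hkeys : (pre.foldl mdtStepG PySem.Dict.empty).keys = mdtTitles pre := by
      show (pre.foldl mdtStepG PySem.Dict.empty).items.map Prod.fst = _
      rw [ih, List.map_map]; simp [Function.comp_def]
    have hdnd : (pre.foldl mdtStepG PySem.Dict.empty).keys.Nodup := by rw [hkeys]; exact hnd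
    rw [List.foldl_append, List.foldl_cons, List.foldl_nil]
    set d := pre.foldl mdtStepG PySem.Dict.empty with hd
    set t := PySem.Chars.strip (pvGet s "title") with ht
    set b := PySem.Chars.strip (pvGet s "body") with hb
    unfold mdtStepG
    have htitles : mdtTitles (pre ++ [s]) = if t ∈ mdtTitles pre then mdtTitles pre else mdtTitles pre ++ [t] := by
      rw [mdtTitles_eq_foldl, List.foldl_append, ← mdtTitles_eq_foldl]
      rfl
    simp only [← ht, ← hb]
    by_cases hm : t ∈ mdtTitles pre
    · have hc : d.contains t = true := by
        rw [PySem.Dict.contains_eq_decide_mem_keys, hkeys]; simpa using hm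
      rw [PySem.Dict.setdefault_of_contains _ _ hc, htitles, if_pos hm]
      have hget : d.getD t [] = mdtBodies pre t := by
        have hmem : (t, mdtBodies pre t) ∈ d.items := by
          rw [ih]; exact List.mem_map.mpr ⟨t, hm, rfl⟩
        exact PySem.Dict.getD_of_mem_items d hmem hdnd []
      by_cases hbe : b = []
      · simp only [hbe, ne_eq, not_true_eq_false, ite_false]
        rw [ih]
        apply List.map_congr_left
        intro t' _
        rw [mdtBodies_append]
        simp only [← ht, ← hb, hbe]
        split_ifs <;> simp
      · simp only [ne_eq, hbe, not_false_eq_true, if_pos]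
        rw [PySem.Dict.modify, PySem.Dict.items_insert_of_contains _ _ hc, ih, List.map_map]
        apply List.map_congr_left
        intro t' ht'
        simp only [Function.comp]
        rw [mdtBodies_append]
        simp only [← ht, ← hb]
        by_cases htt : t' = t
        · subst htt
          simp [hget, hbe]
        · have : (t' == t) = false := by simpa using htt
          have hne : ¬ t = t' := fun e => htt e.symm
          simp [this, hne]
    · have hc : d.contains t = false := by
        rw [PySem.Dict.contains_eq_decide_mem_keys, hkeys]; simpa using hm
      rw [PySem.Dict.setdefault_of_not_contains _ _ hc, htitles, if_neg hm]
      have hbpre : mdtBodies pre t = [] := mdtBodies_nil_of_not_mem pre t hm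
      have hmain : d.items = (mdtTitles pre).map (fun t' => (t', mdtBodies (pre ++ [s]) t')) := by
        rw [ih]
        apply List.map_congr_left
        intro t' ht'
        rw [mdtBodies_append]
        have htt : ¬ (PySem.Chars.strip (pvGet s "title") = t') := fun e => hm ((ht.trans e) ▸ ht')
        rw [if_neg htt, List.append_nil]
      have hlast : mdtBodies (pre ++ [s]) t = if b = [] then [] else [b] := by
        rw [mdtBodies_append, hbpre]
        simp [← ht, ← hb]
      by_cases hbe : b = []
      · simp only [hbe, ne_eq, not_true_eq_false, ite_false]
        rw [PySem.Dict.items_insert_of_not_contains _ _ hc, List.map_append,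
          List.map_cons, List.map_nil, hmain, hlast, if_pos hbe]
      · simp only [ne_eq, hbe, not_false_eq_true, if_pos]
        rw [PySem.Dict.modify, PySem.Dict.getD_insert_self, PySem.Dict.insert_insert_self,
          PySem.Dict.items_insert_of_not_contains _ _ hc, List.map_append,
          List.map_cons, List.map_nil, hmain, hlast, if_neg hbe]
        simp

-- ===== VERDICT (by name: the statement is the Claim_ definition above) =====
theorem merge_duplicate_titles_spec : Claim_equal_merge_duplicate_titles := by
  intro sections _
  unfold Spec_merge_duplicate_titles merge_duplicate_titles merge_duplicate_titles_alt
  have h := mdt_fold sections PySem.Dict.empty PySem.Dict.empty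
    ⟨PySem.Dict.nodup_keys_empty, by simp [PySem.Dict.empty], by simp [PySem.Dict.empty]⟩
  obtain ⟨-, -, hitems⟩ := h
  rw [mdt_group_spec] at hitems
  simp only [hitems, List.map_map]
  rfl
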